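-- pv_equiv track=rewrite | github.com/Rocky-04/Multishop_Django_Web_Store | src/shop/services.py | get_rating_html
-- ===== SOURCE A (Python) =====
-- def get_rating_html(rating: int = 5) -> str:
--     """
--     Draws product rating stars based on average rating.
--
--     :param rating: The average rating of the product, on a scale of 1 to 5.
--     :return: A string containing the HTML for the star rating.
--     """
--     rating = float(rating)
--     html_stars = ""
--
--     # Loop 5 times to create the 5 stars
--     for _x in range(5):
--         if rating >= 0.5:
--             html_stars += '<i class="fas fa-star text-primary mr-1"></i>'
--         elif rating > 0.3:
--             html_stars += '<i class="fas fa-star-half-alt text-primary mr-1"></i>'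
--         else:
--             html_stars += '<i class="far fa-star text-primary mr-1"></i>'
--         rating -= 1
--
--     # Return the HTML for the star rating
--     return html_stars
-- ===== SOURCE B (Python) =====
-- FULL = '<i class="fas fa-star text-primary mr-1"></i>'
-- EMPTY = '<i class="far fa-star text-primary mr-1"></i>'
--
--
-- def get_rating_html(rating: int = 5) -> str:
--     """Count-then-assemble: for an integer rating no half star can appear
--     (rating - i is never strictly between 0.3 and 0.5), so the result is
--     min(max(rating, 0), 5) full stars followed by empty stars."""
--     full = min(max(rating, 0), 5)
--     return FULL * full + EMPTY * (5 - full)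
-- ===== Notes on version B (the rewrite author's own statement) =====
-- stated objective: simpler
-- what changed: Replaces the 5-iteration branching loop that decrements the rating with a closed-form count: clamp the integer rating to [0,5] and build the string by multiplication (full stars then empty stars); the half-star branch is unreachable for integer input so B drops it.
import Mathlib
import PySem

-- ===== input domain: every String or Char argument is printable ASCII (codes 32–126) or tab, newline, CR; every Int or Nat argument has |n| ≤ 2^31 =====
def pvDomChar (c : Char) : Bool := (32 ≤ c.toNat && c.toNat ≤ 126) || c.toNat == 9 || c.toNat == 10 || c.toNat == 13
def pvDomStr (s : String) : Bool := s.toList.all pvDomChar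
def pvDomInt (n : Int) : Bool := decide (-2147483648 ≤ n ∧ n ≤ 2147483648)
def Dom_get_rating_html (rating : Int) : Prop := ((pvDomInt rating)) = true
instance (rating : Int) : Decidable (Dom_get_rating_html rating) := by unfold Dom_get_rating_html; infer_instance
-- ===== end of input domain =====

set_option maxRecDepth 100000


-- B replaces A's 5-step branching loop by a clamp-and-multiply closed form (objective: simpler).

-- ===== PORT A =====
-- One loop iteration: rating is always integer-valued (float(int), then -= 1),
-- so the float comparisons 'rating >= 0.5' and 'rating > 0.3' are both exactly '1 ≤ rating'
-- on the admitted inputs (exact: float(int) is exact for |n| ≤ 2^31).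
def pvStepA (p : Int × String) : Int × String :=
  (p.1 - 1,
    p.2 ++ (if 1 ≤ p.1 then "<i class=\"fas fa-star text-primary mr-1\"></i>"
            else if 1 ≤ p.1 then "<i class=\"fas fa-star-half-alt text-primary mr-1\"></i>"
            else "<i class=\"far fa-star text-primary mr-1\"></i>"))

def get_rating_html (rating : Int) : String :=
  ((List.range 5).foldl (fun p _ => pvStepA p) (rating, "")).2

-- ===== PORT B =====
-- Python's 's * n' for possibly negative n: empty string for n ≤ 0 (exact).
def pvStrMul (s : String) (n : Int) : String :=
  String.join (List.replicate n.toNat s)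

def get_rating_html_alt (rating : Int) : String :=
  pvStrMul "<i class=\"fas fa-star text-primary mr-1\"></i>" (min (max rating 0) 5)
    ++ pvStrMul "<i class=\"far fa-star text-primary mr-1\"></i>" (5 - min (max rating 0) 5)

-- ===== PRECONDITION & SPEC =====
def Spec_get_rating_html (rating : Int) (out : String) : Prop := out = get_rating_html_alt rating
instance (rating : Int) (out : String) : Decidable (Spec_get_rating_html rating out) := by unfold Spec_get_rating_html; infer_instance

-- ===== CLAIM (what is proved, stated in full; the proofs are below) =====
def Claim_equal_get_rating_html : Prop := ∀ (rating : Int), Dom_get_rating_html rating → Spec_get_rating_html rating (get_rating_html rating)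

-- ===== LEMMAS AND PROOFS =====

theorem pv_cases (r : Int) : r ≤ 0 ∨ r = 1 ∨ r = 2 ∨ r = 3 ∨ r = 4 ∨ 5 ≤ r := by omega

theorem pv_low (r : Int) (h : r ≤ 0) : get_rating_html r = get_rating_html_alt r := by
  have e : min (max r 0) 5 = 0 := by omega
  simp only [get_rating_html, get_rating_html_alt, pvStepA, pvStrMul, e,
    List.range_succ, List.range_zero, List.foldl_append, List.foldl_cons, List.foldl_nil,
    List.nil_append]
  rw [if_neg (by omega), if_neg (by omega), if_neg (by omega), if_neg (by omega),
      if_neg (by omega), if_neg (by omega), if_neg (by omega), if_neg (by omega),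
      if_neg (by omega), if_neg (by omega)]
  decide

theorem pv_high (r : Int) (h : 5 ≤ r) : get_rating_html r = get_rating_html_alt r := by
  have e : min (max r 0) 5 = 5 := by omega
  simp only [get_rating_html, get_rating_html_alt, pvStepA, pvStrMul, e,
    List.range_succ, List.range_zero, List.foldl_append, List.foldl_cons, List.foldl_nil,
    List.nil_append]
  rw [if_pos (by omega), if_pos (by omega), if_pos (by omega), if_pos (by omega),
      if_pos (by omega)]
  decide

-- ===== VERDICT (by name: the statement is the Claim_ definition above) =====
theorem get_rating_html_spec : Claim_equal_get_rating_html := by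
  intro r _
  show get_rating_html r = get_rating_html_alt r
  rcases pv_cases r with h | h | h | h | h | h
  · exact pv_low r h
  · subst h; decide
  · subst h; decide
  · subst h; decide
  · subst h; decide
  · exact pv_high r h
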